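-- pv_equiv track=rewrite | github.com/deepikalingineni06/Artificial-Intelligence- | project 1/Task2/maxconnect4.py | horizontalCheck
-- ===== SOURCE A (Python) =====
-- def horizontalCheck( row, column, state, streak):
--     temp_count = 0
--     for j in range(column, 7):
--         if state[row][j] == state[row][column]:
--             temp_count += 1
--         else:
--             break
--     if temp_count >= streak:
--         return 1
--     else:
--         return 0
-- ===== SOURCE B (Python) =====
-- def horizontalCheck(row, column, state, streak):
--     if streak <= 0:
--         return 1
--     if column + streak > 7:
--         return 0
--     r = state[row]
--     return 1 if r[column:column + streak] == [r[column]] * streak else 0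
-- ===== Notes on version B (the rewrite author's own statement) =====
-- stated objective: simpler
-- what changed: Replaces the counting loop with early break by a single equality test between the window state[row][column:column+streak] and the expected homogeneous segment [state[row][column]]*streak (after two trivial guards for streak<=0 and windows overrunning the 7-wide board), so no counter or explicit iteration remains.
-- outside the precondition, e.g. on horizontalCheck(0, -1, [[1, 2, 3, 4, 5, 6, 7, 8]], 1): A returns 1, B returns 0
import Mathlib
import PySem

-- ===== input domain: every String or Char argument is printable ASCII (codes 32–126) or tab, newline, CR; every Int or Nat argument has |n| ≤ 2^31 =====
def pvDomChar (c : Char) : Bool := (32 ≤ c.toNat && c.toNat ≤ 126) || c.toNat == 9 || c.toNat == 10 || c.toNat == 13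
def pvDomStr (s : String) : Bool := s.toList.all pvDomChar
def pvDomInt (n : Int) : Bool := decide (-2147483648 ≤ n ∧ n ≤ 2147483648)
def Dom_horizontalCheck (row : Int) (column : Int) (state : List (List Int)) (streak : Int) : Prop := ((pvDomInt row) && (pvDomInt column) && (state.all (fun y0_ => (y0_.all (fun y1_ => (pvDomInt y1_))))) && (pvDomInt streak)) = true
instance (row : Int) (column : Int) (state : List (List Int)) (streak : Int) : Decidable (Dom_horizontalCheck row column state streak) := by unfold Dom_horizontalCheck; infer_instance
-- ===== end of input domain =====

-- B replaces A's counting loop by one slice-vs-replicate equality test (objective: simpler).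

-- ===== PORT A =====
-- the 'for j in range(column, 7)' loop with its break; state[row][j] / state[row][column]
-- are fetched each iteration exactly as in the Python (none = IndexError, excluded by Pre_)
def hcLoop (state : List (List Int)) (row : Int) (column : Int) : List Int → Int → Int
  | [], cnt => cnt
  | j :: rest, cnt =>
    match (PySem.List.pyGet? state row).bind (fun r => PySem.List.pyGet? r j),
          (PySem.List.pyGet? state row).bind (fun r => PySem.List.pyGet? r column) with
    | some a, some b => if a = b then hcLoop state row column rest (cnt + 1) else cnt
    | _, _ => cnt

def horizontalCheck (row : Int) (column : Int) (state : List (List Int)) (streak : Int) : Int :=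
  if streak ≤ hcLoop state row column (PySem.List.pyRange column 7 1) 0 then 1 else 0

-- ===== PORT B =====
def horizontalCheck_alt (row : Int) (column : Int) (state : List (List Int)) (streak : Int) : Int :=
  if streak ≤ 0 then 1
  else if 7 < column + streak then 0
  else
    match PySem.List.pyGet? state row with
    | none => 0      -- IndexError in Python B (outside Pre_)
    | some r =>
      match PySem.List.pyGet? r column with
      | none => 0    -- IndexError in Python B (outside Pre_)
      | some v =>
        if PySem.List.slice r (some column) (some (column + streak)) = List.replicate streak.toNat v then 1 else 0

-- ===== PRECONDITION & SPEC =====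
-- Pre_ excludes the inputs where Python A raises IndexError (row out of range with column < 7,
-- column not a valid index of the row, or a homogeneous run reaching the end of a row shorter
-- than 7), and negative column, which is outside the natural 0..6 connect-four domain: there A
-- returns an accidental value via negative-index wraparound of 'range(column, 7)'.
def Pre_horizontalCheck (row : Int) (column : Int) (state : List (List Int)) (streak : Int) : Prop :=
  0 ≤ column ∧
  (7 ≤ column ∨
    ((PySem.List.pyGet? state row).elim false (fun r =>
       decide (column < (r.length : Int)) &&
       (decide (7 ≤ (r.length : Int)) ||
        (r.drop column.toNat).any (fun x => x != (r.drop column.toNat).headI)))) = true)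
instance (row : Int) (column : Int) (state : List (List Int)) (streak : Int) : Decidable (Pre_horizontalCheck row column state streak) := by unfold Pre_horizontalCheck; infer_instance

def pvWitness_horizontalCheck : Int × Int × List (List Int) × Int := (0, 0, [[1, 1, 1, 1, 0, 0, 0]], 4)

def Spec_horizontalCheck (row : Int) (column : Int) (state : List (List Int)) (streak : Int) (out : Int) : Prop := out = horizontalCheck_alt row column state streak
instance (row : Int) (column : Int) (state : List (List Int)) (streak : Int) (out : Int) : Decidable (Spec_horizontalCheck row column state streak out) := by unfold Spec_horizontalCheck; infer_instance

-- ===== CLAIM (what is proved, stated in full; the proofs are below) =====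
def Claim_equal_horizontalCheck : Prop := ∀ (row : Int) (column : Int) (state : List (List Int)) (streak : Int), Dom_horizontalCheck row column state streak → Pre_horizontalCheck row column state streak → Spec_horizontalCheck row column state streak (horizontalCheck row column state streak)

-- ===== LEMMAS AND PROOFS =====

lemma hcLoop_acc (state : List (List Int)) (row column : Int) :
    ∀ (js : List Int) (cnt : Int),
      hcLoop state row column js cnt = cnt + hcLoop state row column js 0 := by
  intro js
  induction js with
  | nil => intro cnt; simp [hcLoop]
  | cons j rest ih =>
    intro cnt
    simp only [hcLoop]
    rcases hA : (PySem.List.pyGet? state row).bind (fun r => PySem.List.pyGet? r j) with _ | a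
    · simp
    · rcases hB : (PySem.List.pyGet? state row).bind (fun r => PySem.List.pyGet? r column) with _ | b
      · simp
      · by_cases hab : a = b
        · simp only [hab, if_true]
          rw [ih (cnt + 1), ih (0 + 1)]
          ring
        · simp [hab]

lemma hcLoop_nonneg (state : List (List Int)) (row column : Int) :
    ∀ (js : List Int), 0 ≤ hcLoop state row column js 0 := by
  intro js
  induction js with
  | nil => simp [hcLoop]
  | cons j rest ih =>
    simp only [hcLoop]
    rcases hA : (PySem.List.pyGet? state row).bind (fun r => PySem.List.pyGet? r j) with _ | a
    · simp
    · rcases hB : (PySem.List.pyGet? state row).bind (fun r => PySem.List.pyGet? r column) with _ | b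
      · simp
      · by_cases hab : a = b
        · simp only [hab, if_true]
          rw [hcLoop_acc]
          omega
        · simp [hab]

lemma hcLoop_le_length (state : List (List Int)) (row column : Int) :
    ∀ (js : List Int), hcLoop state row column js 0 ≤ js.length := by
  intro js
  induction js with
  | nil => simp [hcLoop]
  | cons j rest ih =>
    simp only [hcLoop, List.length_cons]
    rcases hA : (PySem.List.pyGet? state row).bind (fun r => PySem.List.pyGet? r j) with _ | a
    · simp; omega
    · rcases hB : (PySem.List.pyGet? state row).bind (fun r => PySem.List.pyGet? r column) with _ | b
      · simp; omega
      · by_cases hab : a = b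
        · simp only [hab, if_true]
          rw [hcLoop_acc]
          push_cast
          omega
        · simp [hab]; omega

-- the heart: A's run count reaches n iff the n-wide slice is the homogeneous window
lemma loop_slice (state : List (List Int)) (row column : Int) (r : List Int)
    (hr : PySem.List.pyGet? state row = some r) (v : Int)
    (hv : PySem.List.pyGet? r column = some v) :
    ∀ (n : Nat) (a : Int), 0 ≤ a → a + (n : Int) ≤ 7 →
      ((n : Int) ≤ hcLoop state row column (PySem.List.pyRange a 7 1) 0 ↔
        PySem.List.slice r (some a) (some (a + (n : Int))) = List.replicate n v) := by
  intro n
  induction n with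
  | zero =>
    intro a ha _
    simp only [Nat.cast_zero, add_zero, List.replicate_zero]
    rw [PySem.List.slice_toNat r ha ha]
    simp [hcLoop_nonneg]
  | succ n ih =>
    intro a ha hle
    have ha7 : a < 7 := by push_cast at hle ⊢; omega
    rw [PySem.List.pyRange_one_cons ha7]
    simp only [hcLoop, hr, Option.bind_some, hv]
    rcases hga : PySem.List.pyGet? r a with _ | w
    · -- index a past the end: loop stops at 0; slice is []
      have hlen : (r.length : Int) ≤ a := by
        rw [PySem.List.pyGet?_eq_none_iff] at hga
        simp only [PySem.Raise.InRange] at hga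
        omega
      have hdrop : r.drop a.toNat = [] := by
        apply List.drop_eq_nil_of_le
        omega
      constructor
      · intro h; exfalso; push_cast at h; omega
      · intro h
        rw [PySem.List.slice_toNat r ha (by omega)] at h
        rw [hdrop] at h
        simp at h
    · -- index a valid, value w
      rw [PySem.List.pyGet?_of_nonneg r ha] at hga
      obtain ⟨hlt, hwa⟩ := List.getElem?_eq_some_iff.mp hga
      have hsl : PySem.List.slice r (some a) (some (a + ((n : Int) + 1))) =
          w :: PySem.List.slice r (some (a + 1)) (some ((a + 1) + (n : Int))) := by
        rw [PySem.List.slice_toNat r ha (by omega),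
            PySem.List.slice_toNat r (by omega) (by omega)]
        rw [List.drop_eq_getElem_cons hlt, hwa]
        have h1 : (a + ((n : Int) + 1)).toNat - a.toNat = n + 1 := by omega
        have h2 : (a + 1).toNat = a.toNat + 1 := by omega
        have h3 : ((a + 1) + (n : Int)).toNat - (a + 1).toNat = n := by omega
        rw [h1, h3, h2, List.take_succ_cons]
      by_cases hwv : w = v
      · simp only [if_pos hwv]
        rw [hcLoop_acc]
        have hiff := ih (a + 1) (by omega) (by push_cast at hle ⊢; omega)
        have hc : ((n + 1 : Nat) : Int) = (n : Int) + 1 := by push_cast; ring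
        rw [hc, hsl, hwv, List.replicate_succ]
        constructor
        · intro h
          rw [hiff.mp (by omega)]
        · intro h
          have h' : PySem.List.slice r (some (a + 1)) (some ((a + 1) + (n : Int))) = List.replicate n v :=
            (List.cons.injEq _ _ _ _ ▸ h).2
          have := hiff.mpr h'
          omega
      · simp only [if_neg hwv]
        have hc : ((n + 1 : Nat) : Int) = (n : Int) + 1 := by push_cast; ring
        rw [hc, hsl, List.replicate_succ]
        constructor
        · intro h; exfalso; omega
        · intro h
          exact absurd (List.cons.injEq _ _ _ _ ▸ h).1 hwv

-- ===== VERDICT (by name: the statement is the Claim_ definition above) =====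
theorem horizontalCheck_spec : Claim_equal_horizontalCheck := by
  intro row column state streak _ hPre
  obtain ⟨hc0, hrest⟩ := hPre
  unfold Spec_horizontalCheck horizontalCheck horizontalCheck_alt
  by_cases hs : streak ≤ 0
  · have h0 := hcLoop_nonneg state row column (PySem.List.pyRange column 7 1)
    rw [if_pos (by omega), if_pos hs]
  · rw [if_neg hs]
    by_cases h7 : 7 ≤ column
    · rw [PySem.List.pyRange_one_eq_nil (by omega)]
      simp only [hcLoop]
      rw [if_neg (by omega), if_pos (by omega)]
    · rcases hrest with h7' | hb
      · omega
      rcases hr : PySem.List.pyGet? state row with _ | r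
      · rw [hr] at hb; simp at hb
      rw [hr] at hb
      simp only [Option.elim_some, Bool.and_eq_true, decide_eq_true_eq, Bool.or_eq_true] at hb
      obtain ⟨hcl, _⟩ := hb
      have hlt : column.toNat < r.length := by omega
      have hv : PySem.List.pyGet? r column = some (r[column.toNat]'hlt) := by
        rw [PySem.List.pyGet?_of_nonneg r hc0]
        simp [List.getElem?_eq_getElem hlt]
      by_cases hbig : 7 < column + streak
      · rw [if_pos hbig]
        have hle := hcLoop_le_length state row column (PySem.List.pyRange column 7 1)
        rw [PySem.List.length_pyRange_one] at hle
        rw [if_neg (by omega)]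
      · rw [if_neg hbig]
        simp only [hv]
        have hst : ((streak.toNat : Int)) = streak := by omega
        have hiff := loop_slice state row column r hr _ hv streak.toNat column hc0
          (by rw [hst]; omega)
        rw [hst] at hiff
        by_cases heq : PySem.List.slice r (some column) (some (column + streak)) =
            List.replicate streak.toNat (r[column.toNat]'hlt)
        · rw [if_pos (hiff.mpr heq), if_pos heq]
        · rw [if_neg (fun h => heq (hiff.mp h)), if_neg heq]
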